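-- pv_equiv track=rewrite | github.com/ohyeaheasymoney/EcaCCDashBoard_Prod | config_backend.py | _parse_audit_line
-- ===== SOURCE A (Python) =====
-- from typing import Dict, List, Optional, Any
--
-- def _parse_audit_line(line: str) -> Optional[Dict[str, str]]:
--     """Parse a single audit log line into a dict with timestamp, action, etc."""
--     line = line.strip()
--     if not line:
--         return None
--     entry: Dict[str, str] = {"raw": line}
--     parts = line.split(" ", 2)
--     if len(parts) >= 3:
--         entry["timestamp"] = parts[0] + " " + parts[1]
--         remainder = parts[2]
--         for field in ("ACTION", "JOB", "USER", "IP", "DETAIL"):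
--             marker = f"{field}="
--             idx = remainder.find(marker)
--             if idx != -1:
--                 val_start = idx + len(marker)
--                 next_idx = len(remainder)
--                 for nf in ("ACTION", "JOB", "USER", "IP", "DETAIL"):
--                     ni = remainder.find(f" {nf}=", val_start)
--                     if ni != -1 and ni < next_idx:
--                         next_idx = ni
--                 entry[field.lower()] = remainder[val_start:next_idx].strip()
--     return entry
-- ===== SOURCE B (Python) =====
-- def _parse_audit_line(line):
--     """Parse a single audit log line into a dict with timestamp, action, etc."""
--     line = line.strip()
--     if not line:
--         return None
--     parts = line.split(" ", 2)
--     pairs = [("raw", line)]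
--     if len(parts) >= 3:
--         pairs.append(("timestamp", parts[0] + " " + parts[1]))
--         remainder = parts[2]
--         terms = tuple(" " + f + "=" for f in ("ACTION", "JOB", "USER", "IP", "DETAIL"))
--         for field in ("ACTION", "JOB", "USER", "IP", "DETAIL"):
--             i = remainder.find(field + "=")
--             if i == -1:
--                 continue
--             start = i + len(field) + 1
--             end = start
--             while end < len(remainder) and not remainder.startswith(terms, end):
--                 end += 1
--             pairs.append((field.lower(), remainder[start:end].strip()))
--     return dict(pairs)
-- ===== Notes on version B (the rewrite author's own statement) =====
-- stated objective: alternative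
-- what changed: A builds a dict by inserts and ends each field's value with the minimum over five separate find calls for the space-prefixed markers; B accumulates a flat list of (key, value) pairs turned into a dict once at the end, and finds each value's end with a single forward character scan that stops at the first position where any terminator starts.
import Mathlib
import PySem

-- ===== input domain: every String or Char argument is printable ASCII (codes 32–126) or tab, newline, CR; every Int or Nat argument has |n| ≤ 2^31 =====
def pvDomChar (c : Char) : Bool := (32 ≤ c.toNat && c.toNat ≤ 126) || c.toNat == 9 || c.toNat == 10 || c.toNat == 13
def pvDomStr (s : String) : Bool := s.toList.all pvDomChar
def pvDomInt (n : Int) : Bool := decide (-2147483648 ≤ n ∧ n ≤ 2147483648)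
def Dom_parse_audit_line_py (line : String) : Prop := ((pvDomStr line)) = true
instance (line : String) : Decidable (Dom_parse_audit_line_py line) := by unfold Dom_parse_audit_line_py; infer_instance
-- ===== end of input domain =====

-- B replaces A's dict built by inserts plus a per-field minimum over five separate finds with a
-- flat list of (key, value) pairs turned into a dict at the end, each value's end found by one
-- forward character scan for the first terminator (alternative decomposition, same results).

-- ===== PORT A =====
def pvFields : List String := ["ACTION", "JOB", "USER", "IP", "DETAIL"]

def parse_audit_line_py (line : String) : Option (List (String × String)) :=
  let line := PySem.Str.strip line
  if line = "" then
    none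
  else
    let entry : PySem.Dict String String := PySem.Dict.empty.insert "raw" line
    -- sep " " ≠ "", so split(" ", 2) never raises: getD is exact
    let parts := (PySem.Str.splitMax? line " " 2).getD []
    let entry :=
      if 3 ≤ parts.length then
        -- parts[0]/parts[1]/parts[2] are in range (length ≥ 3): pyGetD is exact
        let entry := entry.insert "timestamp"
          (PySem.List.pyGetD parts 0 "" ++ " " ++ PySem.List.pyGetD parts 1 "")
        let remainder := PySem.List.pyGetD parts 2 ""
        pvFields.foldl (fun entry field =>
          let marker := field ++ "="
          let idx := PySem.Str.find remainder marker
          if idx ≠ -1 then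
            let val_start := idx + PySem.Str.len marker
            let next_idx := pvFields.foldl (fun next_idx nf =>
              let ni := PySem.Str.findFrom remainder (" " ++ nf ++ "=") val_start none
              if ni ≠ -1 ∧ ni < next_idx then ni else next_idx) (PySem.Str.len remainder)
            entry.insert (PySem.Str.lower field)
              (PySem.Str.strip (PySem.Str.slice remainder (some val_start) (some next_idx)))
          else entry) entry
      else entry
    some entry.items

-- ===== PORT B =====
def pvTerms : List String := pvFields.map (fun f => " " ++ f ++ "=")

-- 'while end < len(remainder) and not remainder.startswith(terms, end): end += 1'
def pvScanEnd (cs : List Char) (j : Nat) : Nat :=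
  if h : j < cs.length ∧ (pvTerms.any (fun t => t.toList.isPrefixOf (cs.drop j))) = false then
    pvScanEnd cs (j + 1)
  else j
termination_by cs.length - j
decreasing_by omega

def parse_audit_line_py_alt (line : String) : Option (List (String × String)) :=
  let line := PySem.Str.strip line
  if line = "" then
    none
  else
    let parts := (PySem.Str.splitMax? line " " 2).getD []
    let pairs : List (String × String) := [("raw", line)]
    let pairs :=
      if 3 ≤ parts.length then
        let pairs := pairs ++
          [("timestamp", PySem.List.pyGetD parts 0 "" ++ " " ++ PySem.List.pyGetD parts 1 "")]
        let remainder := PySem.List.pyGetD parts 2 ""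
        pvFields.foldl (fun pairs field =>
          let i := PySem.Str.find remainder (field ++ "=")
          if i = -1 then pairs
          else
            -- i ≥ 0 here, so toNat is exact
            let start := i + PySem.Str.len field + 1
            let e := pvScanEnd remainder.toList start.toNat
            pairs ++ [(PySem.Str.lower field,
              PySem.Str.strip (PySem.Str.slice remainder (some start) (some (e : Int))))]) pairs
      else pairs
    some (PySem.Dict.ofList pairs).items

-- ===== PRECONDITION & SPEC =====
def Spec_parse_audit_line_py (line : String) (out : Option (List (String × String))) : Prop := out = parse_audit_line_py_alt line
instance (line : String) (out : Option (List (String × String))) : Decidable (Spec_parse_audit_line_py line out) := by unfold Spec_parse_audit_line_py; infer_instance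

-- ===== CLAIM (what is proved, stated in full; the proofs are below) =====
def Claim_equal_parse_audit_line_py : Prop := ∀ (line : String), Dom_parse_audit_line_py line → Spec_parse_audit_line_py line (parse_audit_line_py line)

-- ===== LEMMAS AND PROOFS =====

def pvFound (cs : List Char) (pats : List (List Char)) (i : Nat) : Bool :=
  pats.any (fun p => p.isPrefixOf (cs.drop i))

lemma pv_prefix_drop_infix {p cs : List Char} {v i : Nat} (hv : v ≤ i)
    (h : p <+: cs.drop i) : p <:+: cs.drop v := by
  have : cs.drop i = (cs.drop v).drop (i - v) := by
    rw [List.drop_drop]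
    congr 1
    omega
  rw [this] at h
  exact h.isInfix.trans (List.drop_suffix _ _).isInfix

lemma pvFound_cons_false_iff (cs : List Char) (p : List Char) (ps : List (List Char)) (i : Nat) :
    pvFound cs (p :: ps) i = false ↔ (¬ p <+: cs.drop i) ∧ pvFound cs ps i = false := by
  unfold pvFound
  rw [List.any_eq_false, List.any_eq_false]
  constructor
  · intro h
    refine ⟨?_, fun x hx => h x (List.mem_cons.2 (Or.inr hx))⟩
    simpa [List.isPrefixOf_iff_prefix] using h p (List.mem_cons.2 (Or.inl rfl))
  · rintro ⟨h1, h2⟩ x hx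
    rcases List.mem_cons.1 hx with rfl | hx'
    · simpa [List.isPrefixOf_iff_prefix] using h1
    · exact h2 x hx'

lemma pvFound_cons_of_tail (cs : List Char) (p : List Char) (ps : List (List Char)) (i : Nat)
    (h : pvFound cs ps i = true) : pvFound cs (p :: ps) i = true := by
  simp [pvFound] at h ⊢
  exact Or.inr h

lemma pvFound_cons_of_head (cs : List Char) (p : List Char) (ps : List (List Char)) (i : Nat)
    (h : p <+: cs.drop i) : pvFound cs (p :: ps) i = true := by
  simp [pvFound]
  exact Or.inl h

theorem pv_foldA_gen (cs : List Char) (vN : Nat) (hv : vN ≤ cs.length) :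
    ∀ (pats : List (List Char)), (∀ p ∈ pats, p ≠ []) → ∀ (accN : Nat), vN ≤ accN → accN ≤ cs.length →
    ∃ rN : Nat,
      (pats.foldl (fun next_idx p =>
        let ni := PySem.Chars.findFrom cs p (vN : Int) none
        if ni ≠ -1 ∧ ni < next_idx then ni else next_idx) ((accN : Nat) : Int)) = (rN : Int)
      ∧ vN ≤ rN ∧ rN ≤ accN
      ∧ (rN < accN → pvFound cs pats rN = true)
      ∧ (∀ i, vN ≤ i → i < rN → pvFound cs pats i = false) := by
  intro pats
  induction pats with
  | nil =>
    intro _ accN h1 h2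
    exact ⟨accN, rfl, h1, le_refl _, by omega, by intro i hh1 hh2; simp [pvFound]⟩
  | cons p ps ih =>
    intro hne accN h1 h2
    have hpne : p ≠ [] := hne p (by simp)
    have hpsne : ∀ q ∈ ps, q ≠ [] := fun q hq => hne q (by simp [hq])
    simp only [List.foldl_cons]
    by_cases hni : PySem.Chars.findFrom cs p (vN : Int) none = -1
    · -- p has no occurrence at or after vN
      have hnowhere : ¬ p <:+: cs.drop vN :=
        (PySem.Chars.findFrom_natCast_eq_neg_one_iff cs p vN hv).1 hni
      simp only [hni]
      have hstep : (if (-1 : Int) ≠ -1 ∧ (-1 : Int) < (accN : Int) then (-1 : Int) else (accN : Int)) = (accN : Int) := by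
        simp
      rw [hstep]
      obtain ⟨rN, hfold, hvr, hra, hfnd, hmin⟩ := ih hpsne accN h1 h2
      refine ⟨rN, hfold, hvr, hra, ?_, ?_⟩
      · intro hlt
        exact pvFound_cons_of_tail cs p ps rN (hfnd hlt)
      · intro i hi1 hi2
        rw [pvFound_cons_false_iff]
        refine ⟨?_, hmin i hi1 hi2⟩
        intro hpre
        exact hnowhere (pv_prefix_drop_infix hi1 hpre)
    · -- p occurs: findFrom gives the least match position ≥ vN
      obtain ⟨hge, hpre, hminp⟩ := PySem.Chars.findFrom_natCast_spec cs p vN hv hni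
      set ni := PySem.Chars.findFrom cs p (vN : Int) none with hnidef
      have hni0 : (0 : Int) ≤ ni := le_trans (by exact_mod_cast Nat.zero_le vN) hge
      set niN := ni.toNat with hniN
      have hcast : ni = (niN : Int) := by omega
      have hvni : vN ≤ niN := by omega
      have hnin : niN < cs.length := by
        have hlen := hpre.length_le
        rw [List.length_drop] at hlen
        have hplen : 0 < p.length := List.length_pos_iff.2 hpne
        omega
      by_cases hlt : ni < (accN : Int)
      · have hstep : (if ni ≠ -1 ∧ ni < (accN : Int) then ni else (accN : Int)) = (niN : Int) := by
          rw [if_pos ⟨hni, hlt⟩]; exact hcast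
        rw [hstep]
        obtain ⟨rN, hfold, hvr, hra, hfnd, hmin⟩ := ih hpsne niN hvni (le_of_lt hnin)
        refine ⟨rN, hfold, hvr, by omega, ?_, ?_⟩
        · intro _
          rcases lt_or_eq_of_le hra with hr | hr
          · exact pvFound_cons_of_tail cs p ps rN (hfnd hr)
          · subst hr
            exact pvFound_cons_of_head cs p ps niN hpre
        · intro i hi1 hi2
          rw [pvFound_cons_false_iff]
          refine ⟨?_, hmin i hi1 hi2⟩
          intro hpi
          exact hminp i (by exact_mod_cast hi1) (by omega) hpi
      · have hstep : (if ni ≠ -1 ∧ ni < (accN : Int) then ni else (accN : Int)) = (accN : Int) := by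
          rw [if_neg]; intro hc; exact hlt hc.2
        rw [hstep]
        obtain ⟨rN, hfold, hvr, hra, hfnd, hmin⟩ := ih hpsne accN h1 h2
        refine ⟨rN, hfold, hvr, hra, ?_, ?_⟩
        · intro hr
          exact pvFound_cons_of_tail cs p ps rN (hfnd hr)
        · intro i hi1 hi2
          rw [pvFound_cons_false_iff]
          refine ⟨?_, hmin i hi1 hi2⟩
          intro hpi
          exact hminp i (by exact_mod_cast hi1) (by omega) hpi

lemma pv_any_eq_found (cs : List Char) (j : Nat) :
    (pvTerms.any (fun t => t.toList.isPrefixOf (cs.drop j)))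
      = pvFound cs (pvTerms.map String.toList) j := by
  unfold pvFound
  rw [List.any_map]
  rfl

-- the while loop returns the least position ≥ j (and ≤ len) where a terminator starts
theorem pvScanEnd_spec (cs : List Char) : ∀ (n j : Nat), cs.length - j = n → j ≤ cs.length →
    j ≤ pvScanEnd cs j ∧ pvScanEnd cs j ≤ cs.length ∧
    (pvScanEnd cs j < cs.length → pvFound cs (pvTerms.map String.toList) (pvScanEnd cs j) = true) ∧
    (∀ i, j ≤ i → i < pvScanEnd cs j → pvFound cs (pvTerms.map String.toList) i = false) := by
  intro n
  induction n with
  | zero =>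
    intro j hn hj
    have hje : j = cs.length := by omega
    rw [pvScanEnd, dif_neg (by omega)]
    exact ⟨le_refl _, hj, by omega, by intro i h1 h2; omega⟩
  | succ m ih =>
    intro j hn hj
    by_cases hc : j < cs.length ∧ (pvTerms.any (fun t => t.toList.isPrefixOf (cs.drop j))) = false
    · rw [pvScanEnd, dif_pos hc]
      obtain ⟨h1, h2, h3, h4⟩ := ih (j + 1) (by omega) (by omega)
      refine ⟨by omega, h2, h3, ?_⟩
      intro i hi1 hi2
      rcases Nat.eq_or_lt_of_le hi1 with rfl | hgt
      · rw [← pv_any_eq_found]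
        exact hc.2
      · exact h4 i hgt hi2
    · rw [pvScanEnd, dif_neg hc]
      refine ⟨le_refl _, hj, ?_, by intro i h1 h2; omega⟩
      intro hlt
      rw [← pv_any_eq_found]
      rcases Bool.eq_false_or_eq_true (pvTerms.any (fun t => t.toList.isPrefixOf (cs.drop j))) with ht | hf
      · exact ht
      · exact absurd ⟨hlt, hf⟩ hc

lemma pv_least_unique (cs : List Char) (pats : List (List Char)) (vN : Nat) (r r' : Nat)
    (h1 : vN ≤ r) (h2 : r ≤ cs.length) (h3 : r < cs.length → pvFound cs pats r = true)
    (h4 : ∀ i, vN ≤ i → i < r → pvFound cs pats i = false)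
    (h1' : vN ≤ r') (h2' : r' ≤ cs.length) (h3' : r' < cs.length → pvFound cs pats r' = true)
    (h4' : ∀ i, vN ≤ i → i < r' → pvFound cs pats i = false) : r = r' := by
  rcases lt_trichotomy r r' with hlt | heq | hgt
  · have hr : r < cs.length := by omega
    have := h3 hr
    rw [h4' r h1 hlt] at this
    exact absurd this (by simp)
  · exact heq
  · have hr : r' < cs.length := by omega
    have := h3' hr
    rw [h4 r' h1' hgt] at this
    exact absurd this (by simp)

lemma pv_terms_ne_nil : ∀ p ∈ pvTerms.map String.toList, p ≠ [] := by decide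

lemma pv_inner_eq (remainder : String) (vN : Nat) (hv : vN ≤ remainder.toList.length) :
    pvFields.foldl (fun next_idx nf =>
      let ni := PySem.Str.findFrom remainder (" " ++ nf ++ "=") ((vN : Nat) : Int) none
      if ni ≠ -1 ∧ ni < next_idx then ni else next_idx) (PySem.Str.len remainder)
    = ((pvScanEnd remainder.toList vN : Nat) : Int) := by
  obtain ⟨rA, hfold, hA1, hA2, hA3, hA4⟩ :=
    pv_foldA_gen remainder.toList vN hv (pvTerms.map String.toList) pv_terms_ne_nil
      remainder.toList.length hv (le_refl _)
  obtain ⟨hB1, hB2, hB3, hB4⟩ :=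
    pvScanEnd_spec remainder.toList (remainder.toList.length - vN) vN rfl hv
  have hAfold : pvFields.foldl (fun next_idx nf =>
      let ni := PySem.Str.findFrom remainder (" " ++ nf ++ "=") ((vN : Nat) : Int) none
      if ni ≠ -1 ∧ ni < next_idx then ni else next_idx) (PySem.Str.len remainder)
    = (pvTerms.map String.toList).foldl (fun next_idx p =>
      let ni := PySem.Chars.findFrom remainder.toList p ((vN : Nat) : Int) none
      if ni ≠ -1 ∧ ni < next_idx then ni else next_idx) ((remainder.toList.length : Nat) : Int) := by
    rw [pvTerms, List.map_map, List.foldl_map]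
    simp [Function.comp]
  rw [hAfold, hfold]
  exact_mod_cast pv_least_unique remainder.toList _ vN rA _ hA1 hA2 hA3 hA4 hB1 hB2 hB3 hB4

lemma pv_ofList_append (p : List (String × String)) (k v : String) :
    PySem.Dict.ofList (p ++ [(k, v)]) = (PySem.Dict.ofList p).insert k v := by
  simp [PySem.Dict.ofList, PySem.Dict.update, List.foldl_append]

lemma pv_fold_pairs (remainder : String) (fields : List String) :
    ∀ (p : List (String × String)),
    fields.foldl (fun entry field =>
      let marker := field ++ "="
      let idx := PySem.Str.find remainder marker
      if idx ≠ -1 then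
        let val_start := idx + PySem.Str.len marker
        let next_idx := pvFields.foldl (fun next_idx nf =>
          let ni := PySem.Str.findFrom remainder (" " ++ nf ++ "=") val_start none
          if ni ≠ -1 ∧ ni < next_idx then ni else next_idx) (PySem.Str.len remainder)
        entry.insert (PySem.Str.lower field)
          (PySem.Str.strip (PySem.Str.slice remainder (some val_start) (some next_idx)))
      else entry) (PySem.Dict.ofList p)
    = PySem.Dict.ofList (fields.foldl (fun pairs field =>
        let i := PySem.Str.find remainder (field ++ "=")
        if i = -1 then pairs
        else
          let start := i + PySem.Str.len field + 1
          let e := pvScanEnd remainder.toList start.toNat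
          pairs ++ [(PySem.Str.lower field,
            PySem.Str.strip (PySem.Str.slice remainder (some start) (some (e : Int))))]) p) := by
  induction fields with
  | nil => intro p; rfl
  | cons f fs ih =>
    intro p
    simp only [List.foldl_cons]
    by_cases hidx : PySem.Str.find remainder (f ++ "=") = -1
    · rw [if_neg (by simpa using hidx), if_pos hidx]
      exact ih p
    · have hinf : (f ++ "=").toList <:+: remainder.toList := (PySem.Str.find_ne_neg_one_iff _ _).1 hidx
      have h0 : (0 : Int) ≤ PySem.Str.find remainder (f ++ "=") := (PySem.Str.find_nonneg_iff _ _).2 hinf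
      have hfind : PySem.Str.find remainder (f ++ "=") = PySem.Chars.find remainder.toList (f ++ "=").toList := by
        simp
      have hspec := (PySem.Chars.find_spec (s := remainder.toList) (sub := (f ++ "=").toList)
        (by rw [← hfind]; exact h0)).1
      have hlen1 : (f ++ "=").toList.length = f.toList.length + 1 := by simp
      have hle : (PySem.Str.find remainder (f ++ "=")).toNat + (f.toList.length + 1)
          ≤ remainder.toList.length := by
        have hl := hspec.length_le
        rw [List.length_drop] at hl
        rw [← hfind] at hl
        rw [hlen1] at hl
        omega
      have hvs : PySem.Str.find remainder (f ++ "=") + PySem.Str.len (f ++ "=")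
          = (((PySem.Str.find remainder (f ++ "=")).toNat + (f.toList.length + 1) : Nat) : Int) := by
        simp only [PySem.Str.len, hlen1]
        push_cast
        omega
      have hvs2 : PySem.Str.find remainder (f ++ "=") + PySem.Str.len f + 1
          = (((PySem.Str.find remainder (f ++ "=")).toNat + (f.toList.length + 1) : Nat) : Int) := by
        simp only [PySem.Str.len]
        push_cast
        omega
      rw [if_pos (by simpa using hidx), if_neg hidx]
      rw [hvs, hvs2, Int.toNat_natCast,
        pv_inner_eq remainder ((PySem.Str.find remainder (f ++ "=")).toNat + (f.toList.length + 1)) hle,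
        ← pv_ofList_append]
      exact ih _

-- ===== VERDICT (by name: the statement is the Claim_ definition above) =====
set_option maxHeartbeats 1000000 in
theorem parse_audit_line_py_spec : Claim_equal_parse_audit_line_py := by
  intro line _
  unfold Spec_parse_audit_line_py parse_audit_line_py parse_audit_line_py_alt
  by_cases hempty : PySem.Str.strip line = ""
  · simp [hempty]
  · simp only [if_neg hempty]
    apply congrArg
    by_cases hlen : 3 ≤ ((PySem.Str.splitMax? (PySem.Str.strip line) " " 2).getD []).length
    · simp only [if_pos hlen]
      apply congrArg
      have h2 : (PySem.Dict.empty.insert "raw" (PySem.Str.strip line)).insert "timestamp"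
          (PySem.List.pyGetD ((PySem.Str.splitMax? (PySem.Str.strip line) " " 2).getD []) 0 "" ++ " "
            ++ PySem.List.pyGetD ((PySem.Str.splitMax? (PySem.Str.strip line) " " 2).getD []) 1 "")
          = PySem.Dict.ofList ([("raw", PySem.Str.strip line)] ++
            [("timestamp", PySem.List.pyGetD ((PySem.Str.splitMax? (PySem.Str.strip line) " " 2).getD []) 0 "" ++ " "
              ++ PySem.List.pyGetD ((PySem.Str.splitMax? (PySem.Str.strip line) " " 2).getD []) 1 "")]) := by
        rfl
      rw [h2]
      exact pv_fold_pairs _ pvFields _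
    · simp only [if_neg hlen]
      rfl
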